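-- pv_equiv track=rewrite | github.com/chiuser/stock | app/routers/admin.py | _task_status_from_events
-- ===== SOURCE A (Python) =====
-- def _task_status_from_events(events: list[dict]) -> dict:
--     """从事件列表中推断任务最新状态。"""
--     # 找最后一次 start 的位置，从那里开始取
--     last_start = None
--     for i, ev in enumerate(events):
--         if ev["type"] == "start":
--             last_start = i
--
--     recent = events[last_start:] if last_start is not None else events
--
--     result = {"status": "pending", "started_at": None, "finished_at": None}
--     for ev in recent:
--         t = ev["type"]
--         if t == "start":
--             result["status"] = "running"
--             result["started_at"] = ev["ts"]
--         elif t == "success":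
--             result["status"] = "success"
--             result["finished_at"] = ev["ts"]
--         elif t == "failed":
--             result["status"] = "failed"
--             result["finished_at"] = ev["ts"]
--             result["error"] = ev.get("msg", "")
--
--     return result
-- ===== SOURCE B (Python) =====
-- def _task_status_from_events(events: list[dict]) -> dict:
--     """Backward scan: walk the events from the end and stop at the first 'start'
--     seen (= the last start), so the prefix is never sliced or replayed; the first
--     success/failed met backward is the last one forward and decides the outcome."""
--     status = "pending"
--     started_at = None
--     finished_at = None
--     has_error = False
--     error = None
--     for ev in reversed(events):
--         t = ev["type"]
--         if t == "start":
--             if status == "pending":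
--                 status = "running"
--             started_at = ev["ts"]
--             break
--         elif t == "success":
--             if status == "pending":
--                 status = "success"
--                 finished_at = ev["ts"]
--         elif t == "failed":
--             if status == "pending":
--                 status = "failed"
--                 finished_at = ev["ts"]
--             if not has_error:
--                 has_error = True
--                 error = ev.get("msg", "")
--     result = {"status": status, "started_at": started_at, "finished_at": finished_at}
--     if has_error:
--         result["error"] = error
--     return result
-- ===== Notes on version B (the rewrite author's own statement) =====
-- stated objective: alternative
-- what changed: B replaces A's two-phase scheme (scan for the last 'start' index, slice, replay the suffix into a mutated dict) by a single backward scan with scalar state that breaks at the first 'start' seen and assembles the result dict once at the end.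
import Mathlib
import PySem

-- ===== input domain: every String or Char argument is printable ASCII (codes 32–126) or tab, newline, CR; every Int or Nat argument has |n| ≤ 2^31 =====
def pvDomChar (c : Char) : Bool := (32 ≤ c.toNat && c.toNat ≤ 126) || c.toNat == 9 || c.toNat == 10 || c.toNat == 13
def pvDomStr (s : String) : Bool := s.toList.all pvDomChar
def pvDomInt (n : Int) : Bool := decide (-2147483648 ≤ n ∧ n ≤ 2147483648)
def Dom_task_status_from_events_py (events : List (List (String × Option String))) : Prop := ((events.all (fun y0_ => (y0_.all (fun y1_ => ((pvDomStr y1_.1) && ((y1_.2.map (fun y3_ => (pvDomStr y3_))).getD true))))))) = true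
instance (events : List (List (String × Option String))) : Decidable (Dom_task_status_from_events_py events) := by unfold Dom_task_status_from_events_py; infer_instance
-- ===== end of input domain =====

-- B replaces A's two-pass scheme (find the last 'start', slice, replay the suffix into a
-- mutated dict) by one backward scan with scalar state that breaks at the first 'start' seen;
-- return-value equivalence on Pre_ is proved.

-- ===== PORT A =====
-- first loop of A: remember the index of the last event whose "type" is "start"
def pvLsStep (acc : Option Int) (iev : Int × List (String × Option String)) : Option Int :=
  if (PySem.Dict.mk iev.2).get? "type" == some (some "start") then some iev.1 else acc

-- second loop of A: update result according to the event's "type"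
-- (ev["ts"] ported as (get? "ts").getD none; exact under Pre_, where the key exists)
def pvStepA (result : PySem.Dict String (Option String)) (ev : List (String × Option String)) :
    PySem.Dict String (Option String) :=
  let d := PySem.Dict.mk ev
  let t := d.get? "type"
  if t == some (some "start") then
    (result.insert "status" (some "running")).insert "started_at" ((d.get? "ts").getD none)
  else if t == some (some "success") then
    (result.insert "status" (some "success")).insert "finished_at" ((d.get? "ts").getD none)
  else if t == some (some "failed") then
    ((result.insert "status" (some "failed")).insert "finished_at" ((d.get? "ts").getD none)).insert
      "error" (d.getD "msg" (some ""))
  else result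

def task_status_from_events_py (events : List (List (String × Option String))) : List (String × Option String) :=
  let last_start : Option Int := (PySem.List.enumerate events 0).foldl pvLsStep none
  let recent : List (List (String × Option String)) :=
    match last_start with
    | some i => PySem.List.slice events (some i) none
    | none => events
  (recent.foldl pvStepA
    (PySem.Dict.mk [("status", some "pending"), ("started_at", none), ("finished_at", none)])).items

-- ===== PORT B =====
-- B's scalar loop state (status, started_at, finished_at, has_error, error)
structure PvSt where
  status : String
  startedAt : Option String
  finishedAt : Option String
  hasErr : Bool
  err : Option String
deriving DecidableEq, Repr

-- B's backward loop: 'for ev in reversed(events): … break on "start"'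
-- (ev["ts"] ported as (get? "ts").getD none; exact under Pre_, where the key exists)
def pvLoopB (st : PvSt) : List (List (String × Option String)) → PvSt
  | [] => st
  | ev :: rest =>
    let d := PySem.Dict.mk ev
    let t := d.get? "type"
    if t == some (some "start") then
      -- break: return the state right away
      { status := if st.status == "pending" then "running" else st.status,
        startedAt := (d.get? "ts").getD none,
        finishedAt := st.finishedAt, hasErr := st.hasErr, err := st.err }
    else if t == some (some "success") then
      pvLoopB (if st.status == "pending"
               then { st with status := "success", finishedAt := (d.get? "ts").getD none }
               else st) rest
    else if t == some (some "failed") then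
      let st2 := if st.status == "pending"
                 then { st with status := "failed", finishedAt := (d.get? "ts").getD none }
                 else st
      let st3 := if !st2.hasErr
                 then { st2 with hasErr := true, err := d.getD "msg" (some "") }
                 else st2
      pvLoopB st3 rest
    else pvLoopB st rest

-- the final dict literal {"status": …, "started_at": …, "finished_at": …} (+ "error"),
-- written directly as its items list (the keys are distinct literals)
def task_status_from_events_py_alt (events : List (List (String × Option String))) : List (String × Option String) :=
  let st := pvLoopB ⟨"pending", none, none, false, none⟩ events.reverse
  [("status", some st.status), ("started_at", st.startedAt), ("finished_at", st.finishedAt)]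
    ++ (if st.hasErr then [("error", st.err)] else [])

-- ===== PRECONDITION & SPEC =====
-- is ev a "start" event?
def pvIsStart (ev : List (String × Option String)) : Bool :=
  (PySem.Dict.mk ev).get? "type" == some (some "start")

-- does A read ev["ts"] when ev is replayed (type start/success/failed)?
def pvNeedsTs (ev : List (String × Option String)) : Bool :=
  pvIsStart ev || (PySem.Dict.mk ev).get? "type" == some (some "success")
    || (PySem.Dict.mk ev).get? "type" == some (some "failed")

-- Pre_ excludes exactly the inputs on which Python A raises KeyError: an event without a
-- "type" key, or a start/success/failed event without "ts" that is not strictly before a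
-- later "start" (events before the last start are sliced away, so A never reads their "ts").
def Pre_task_status_from_events_py (events : List (List (String × Option String))) : Prop :=
  (∀ ev ∈ events, ((PySem.Dict.mk ev).get? "type").isSome = true) ∧
  (∀ j, j < events.length →
    (pvNeedsTs (events.getD j []) = true ∧
      ((PySem.Dict.mk (events.getD j [])).get? "ts").isSome = false) →
    ∃ k, k < events.length ∧ j < k ∧ pvIsStart (events.getD k []) = true)
instance (events : List (List (String × Option String))) : Decidable (Pre_task_status_from_events_py events) := by unfold Pre_task_status_from_events_py; infer_instance

def pvWitness_task_status_from_events_py : (List (List (String × Option String))) :=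
  [[("type", some "start"), ("ts", some "1")], [("type", some "success"), ("ts", some "2")]]

def Spec_task_status_from_events_py (events : List (List (String × Option String))) (out : List (String × Option String)) : Prop := out = task_status_from_events_py_alt events
instance (events : List (List (String × Option String))) (out : List (String × Option String)) : Decidable (Spec_task_status_from_events_py events out) := by unfold Spec_task_status_from_events_py; infer_instance

-- ===== CLAIM (what is proved, stated in full; the proofs are below) =====
def Claim_equal_task_status_from_events_py : Prop := ∀ (events : List (List (String × Option String))), Dom_task_status_from_events_py events → Pre_task_status_from_events_py events → Spec_task_status_from_events_py events (task_status_from_events_py events)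

-- ===== LEMMAS AND PROOFS =====

-- A's initial result dict
def pvInitD : PySem.Dict String (Option String) :=
  PySem.Dict.mk [("status", some "pending"), ("started_at", none), ("finished_at", none)]

-- B's initial state
def pvInitSt : PvSt := ⟨"pending", none, none, false, none⟩

-- A's result dict, parametrised by its (at most four) values
def pvErrPart (e : Option (Option String)) : List (String × Option String) :=
  match e with | some v => [("error", v)] | none => []

def pvD (s a f : Option String) (e : Option (Option String)) : PySem.Dict String (Option String) :=
  PySem.Dict.mk ([("status", s), ("started_at", a), ("finished_at", f)] ++ pvErrPart e)

-- how B's state renders A's result items, for a start-free replayed segment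
def pvOut (st : PvSt) (s a f : Option String) (e : Option (Option String)) :
    List (String × Option String) :=
  [("status", if st.status == "pending" then s else some st.status),
   ("started_at", a),
   ("finished_at", if st.status == "pending" then f else st.finishedAt)]
  ++ (if st.hasErr then [("error", st.err)] else pvErrPart e)

-- index of the last start event, specified recursively
def pvLsNat (events : List (List (String × Option String))) : Option Nat :=
  match events with
  | [] => none
  | ev :: rest =>
    match pvLsNat rest with
    | some i => some (i + 1)
    | none => if pvIsStart ev then some 0 else none

-- A's enumerate-foldl computes pvLsNat (shifted by the offset)
theorem pvLs_spec (events : List (List (String × Option String))) (s : Int) (a : Option Int) :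
    (PySem.List.enumerate events s).foldl pvLsStep a =
      match pvLsNat events with
      | some i => some (s + i)
      | none => a := by
  induction events generalizing s a with
  | nil => simp [PySem.List.enumerate_nil, pvLsNat]
  | cons ev rest ih =>
    rw [PySem.List.enumerate_cons]
    simp only [List.foldl_cons, pvLsNat]
    rw [ih]
    cases h : pvLsNat rest with
    | some i => simp; ring_nf
    | none =>
      cases hs : pvIsStart ev with
      | true => simp only [pvIsStart] at hs; simp [pvLsStep, hs]
      | false => simp only [pvIsStart] at hs; simp [pvLsStep, hs]

-- if the scan finds no start, no event is a start
theorem pvLsNat_none (events : List (List (String × Option String))) :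
    pvLsNat events = none → ∀ ev ∈ events, pvIsStart ev = false := by
  induction events with
  | nil => intro _; simp
  | cons ev rest ih =>
    intro h
    simp only [pvLsNat] at h
    cases hr : pvLsNat rest with
    | some i => simp [hr] at h
    | none =>
      simp only [hr] at h
      intro e he
      rcases List.mem_cons.mp he with rfl | hm
      · cases hs : pvIsStart e with
        | true => simp [hs] at h
        | false => rfl
      · exact ih hr e hm

-- a found last start decomposes the list: prefix ++ start :: start-free suffix
theorem pvLsNat_decomp (events : List (List (String × Option String))) (i : Nat) :
    pvLsNat events = some i →
    ∃ pre s suf, events = pre ++ s :: suf ∧ pre.length = i ∧ pvIsStart s = true ∧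
      ∀ ev ∈ suf, pvIsStart ev = false := by
  induction events generalizing i with
  | nil => intro h; simp [pvLsNat] at h
  | cons ev rest ih =>
    intro h
    simp only [pvLsNat] at h
    cases hr : pvLsNat rest with
    | some k =>
      rw [hr] at h
      obtain ⟨pre, s, suf, hsplit, hlen, hs, hfree⟩ := ih k hr
      have hki : k + 1 = i := by simpa using h
      refine ⟨ev :: pre, s, suf, ?_, ?_, hs, hfree⟩
      · simp [hsplit]
      · simp only [List.length_cons, hlen]; omega
    | none =>
      rw [hr] at h
      cases hs : pvIsStart ev with
      | true =>
        rw [hs] at h; simp at h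
        exact ⟨[], ev, rest, by simp, by simp [← h], hs, pvLsNat_none rest hr⟩
      | false => rw [hs] at h; simp at h

-- pvStepA on the parametrised dict, one lemma per branch
theorem pvStepA_start (s a f : Option String) (e : Option (Option String))
    (ev : List (String × Option String))
    (h : ((PySem.Dict.mk ev).get? "type" == some (some "start")) = true) :
    pvStepA (pvD s a f e) ev =
      pvD (some "running") (((PySem.Dict.mk ev).get? "ts").getD none) f e := by
  cases e <;> simp only [pvStepA, h, if_true] <;> rfl

theorem pvStepA_succ (s a f : Option String) (e : Option (Option String))
    (ev : List (String × Option String))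
    (h1 : ((PySem.Dict.mk ev).get? "type" == some (some "start")) = false)
    (h2 : ((PySem.Dict.mk ev).get? "type" == some (some "success")) = true) :
    pvStepA (pvD s a f e) ev =
      pvD (some "success") a (((PySem.Dict.mk ev).get? "ts").getD none) e := by
  cases e <;> simp only [pvStepA, h1, h2, if_true, Bool.false_eq_true, if_false] <;> rfl

theorem pvStepA_fail (s a f : Option String) (e : Option (Option String))
    (ev : List (String × Option String))
    (h1 : ((PySem.Dict.mk ev).get? "type" == some (some "start")) = false)
    (h2 : ((PySem.Dict.mk ev).get? "type" == some (some "success")) = false)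
    (h3 : ((PySem.Dict.mk ev).get? "type" == some (some "failed")) = true) :
    pvStepA (pvD s a f e) ev =
      pvD (some "failed") a (((PySem.Dict.mk ev).get? "ts").getD none)
        (some ((PySem.Dict.mk ev).getD "msg" (some ""))) := by
  cases e <;> simp only [pvStepA, h1, h2, h3, if_true, Bool.false_eq_true, if_false] <;> rfl

theorem pvStepA_other (s a f : Option String) (e : Option (Option String))
    (ev : List (String × Option String))
    (h1 : ((PySem.Dict.mk ev).get? "type" == some (some "start")) = false)
    (h2 : ((PySem.Dict.mk ev).get? "type" == some (some "success")) = false)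
    (h3 : ((PySem.Dict.mk ev).get? "type" == some (some "failed")) = false) :
    pvStepA (pvD s a f e) ev = pvD s a f e := by
  simp only [pvStepA, h1, h2, h3, Bool.false_eq_true, if_false]

-- B's loop distributes over ++ while no start occurs
theorem pvLoopB_append (l1 l2 : List (List (String × Option String)))
    (h : ∀ ev ∈ l1, pvIsStart ev = false) (st : PvSt) :
    pvLoopB st (l1 ++ l2) = pvLoopB (pvLoopB st l1) l2 := by
  induction l1 generalizing st with
  | nil => rfl
  | cons ev rest ih =>
    have hs : ((PySem.Dict.mk ev).get? "type" == some (some "start")) = false := by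
      have := h ev (by simp); simpa [pvIsStart] using this
    simp only [List.cons_append, pvLoopB, hs, Bool.false_eq_true, if_false]
    split <;> [skip; split] <;>
      exact ih (fun e he => h e (List.mem_cons_of_mem _ he)) _

-- a start-free scan never touches started_at
theorem pvLoopB_startedAt (l : List (List (String × Option String)))
    (h : ∀ ev ∈ l, pvIsStart ev = false) (st : PvSt) :
    (pvLoopB st l).startedAt = st.startedAt := by
  induction l generalizing st with
  | nil => rfl
  | cons ev rest ih =>
    have hs : ((PySem.Dict.mk ev).get? "type" == some (some "start")) = false := by
      have := h ev (by simp); simpa [pvIsStart] using this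
    have hrest := fun e he => h e (List.mem_cons_of_mem _ he)
    simp only [pvLoopB, hs, Bool.false_eq_true, if_false]
    split
    · rw [ih hrest]; split <;> rfl
    · split
      · rw [ih hrest]
        split <;> split <;> rfl
      · exact ih hrest st

-- a start-free scan that ends still "pending" did nothing
theorem pvLoopB_pending (l : List (List (String × Option String)))
    (h : ∀ ev ∈ l, pvIsStart ev = false) (st : PvSt) :
    (pvLoopB st l).status = "pending" → pvLoopB st l = st := by
  induction l generalizing st with
  | nil => intro _; rfl
  | cons ev rest ih =>
    have hs : ((PySem.Dict.mk ev).get? "type" == some (some "start")) = false := by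
      have := h ev (by simp); simpa [pvIsStart] using this
    have hrest := fun e he => h e (List.mem_cons_of_mem _ he)
    simp only [pvLoopB, hs, Bool.false_eq_true, if_false]
    split
    · intro hp
      have hE := ih hrest _ hp
      rw [hE] at hp ⊢
      split_ifs at hp ⊢ <;> simp_all
    · split
      · intro hp
        have hE := ih hrest _ hp
        rw [hE] at hp ⊢
        split_ifs at hp ⊢ <;> simp_all
      · intro hp
        exact ih hrest st hp

-- core invariant: replaying a start-free segment forward equals B's backward scan of it
theorem pvCore (xs : List (List (String × Option String)))
    (h : ∀ ev ∈ xs, pvIsStart ev = false) (s a f : Option String) (e : Option (Option String)) :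
    (xs.foldl pvStepA (pvD s a f e)).items = pvOut (pvLoopB pvInitSt xs.reverse) s a f e := by
  induction xs generalizing s a f e with
  | nil =>
    simp only [List.foldl_nil, List.reverse_nil, pvLoopB, pvOut, pvInitSt]
    cases e <;> rfl
  | cons ev ys ih =>
    have hs : ((PySem.Dict.mk ev).get? "type" == some (some "start")) = false := by
      have := h ev (by simp); simpa [pvIsStart] using this
    have hys := fun e' he => h e' (List.mem_cons_of_mem _ he)
    have hrev : ∀ e' ∈ ys.reverse, pvIsStart e' = false := by
      intro e' he; exact hys e' (List.mem_reverse.mp he)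
    simp only [List.foldl_cons, List.reverse_cons]
    rw [pvLoopB_append ys.reverse [ev] hrev]
    by_cases h2 : ((PySem.Dict.mk ev).get? "type" == some (some "success")) = true
    · rw [pvStepA_succ s a f e ev hs h2, ih hys]
      simp only [pvLoopB, hs, h2, Bool.false_eq_true, if_false, if_true]
      by_cases hpend : ((pvLoopB pvInitSt ys.reverse).status == "pending") = true
      · have hpe := pvLoopB_pending ys.reverse hrev pvInitSt (by simpa using hpend)
        rw [hpe]
        simp [pvOut, pvInitSt]
      · simp [pvOut, hpend]
    · by_cases h3 : ((PySem.Dict.mk ev).get? "type" == some (some "failed")) = true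
      · rw [pvStepA_fail s a f e ev hs (by simpa using h2) h3, ih hys]
        simp only [pvLoopB, hs, h2, h3, Bool.false_eq_true, if_false, if_true]
        by_cases hpend : ((pvLoopB pvInitSt ys.reverse).status == "pending") = true
        · have hpe := pvLoopB_pending ys.reverse hrev pvInitSt (by simpa using hpend)
          rw [hpe]
          simp [pvOut, pvInitSt, pvErrPart]
        · by_cases herr : (pvLoopB pvInitSt ys.reverse).hasErr = true
          · simp [pvOut, hpend, herr]
          · simp [pvOut, pvErrPart, hpend, herr]
      · rw [pvStepA_other s a f e ev hs (by simpa using h2) (by simpa using h3), ih hys]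
        simp only [pvLoopB, hs, h2, h3, Bool.false_eq_true, if_false]

-- a start event applied to A's initial dict
theorem pvStepA_init_start (ev : List (String × Option String))
    (h : ((PySem.Dict.mk ev).get? "type" == some (some "start")) = true) :
    pvStepA pvInitD ev =
      pvD (some "running") (((PySem.Dict.mk ev).get? "ts").getD none) none none := by
  have : pvInitD = pvD (some "pending") none none none := rfl
  rw [this, pvStepA_start _ _ _ _ _ h]

-- main equivalence on the raw data
theorem pvMain (events : List (List (String × Option String))) :
    task_status_from_events_py events = task_status_from_events_py_alt events := by
  unfold task_status_from_events_py task_status_from_events_py_alt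
  rw [pvLs_spec events 0 none]
  cases hls : pvLsNat events with
  | none =>
    have hfree := pvLsNat_none events hls
    have hrev : ∀ e' ∈ events.reverse, pvIsStart e' = false := by
      intro e' he; exact hfree e' (List.mem_reverse.mp he)
    dsimp only
    rw [show (PySem.Dict.mk [("status", some "pending"), ("started_at", none), ("finished_at", none)]) = pvD (some "pending") none none none from rfl]
    rw [pvCore events hfree]
    rw [show (pvLoopB ⟨"pending", none, none, false, none⟩ events.reverse) = pvLoopB pvInitSt events.reverse from rfl]
    by_cases hpend : ((pvLoopB pvInitSt events.reverse).status == "pending") = true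
    · have hpe := pvLoopB_pending events.reverse hrev pvInitSt (by simpa using hpend)
      rw [hpe]
      simp [pvOut, pvInitSt, pvErrPart]
    · rw [pvLoopB_startedAt events.reverse hrev pvInitSt,
          show pvInitSt.startedAt = none from rfl]
      simp [pvOut, pvErrPart, hpend]
  | some i =>
    obtain ⟨pre, sEv, suf, hsplit, hlen, hstart, hfree⟩ := pvLsNat_decomp events i hls
    have hrev : ∀ e' ∈ suf.reverse, pvIsStart e' = false := by
      intro e' he; exact hfree e' (List.mem_reverse.mp he)
    dsimp only
    rw [show ((0 : Int) + (i : Nat)) = ((i : Nat) : Int) by ring, PySem.List.slice_from_natCast]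
    rw [hsplit, ← hlen, List.drop_left]
    simp only [List.foldl_cons]
    have hstart' : ((PySem.Dict.mk sEv).get? "type" == some (some "start")) = true := by
      simpa [pvIsStart] using hstart
    rw [show (PySem.Dict.mk [("status", some "pending"), ("started_at", none), ("finished_at", none)]) = pvInitD from rfl]
    rw [pvStepA_init_start sEv hstart', pvCore suf hfree]
    -- B's side: reverse splits, scan the suffix, then break at the start event
    rw [List.reverse_append, List.reverse_cons]
    simp only [List.append_assoc, List.singleton_append]
    rw [show (pvLoopB ⟨"pending", none, none, false, none⟩ (suf.reverse ++ sEv :: pre.reverse)) = pvLoopB pvInitSt (suf.reverse ++ sEv :: pre.reverse) from rfl]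
    rw [pvLoopB_append suf.reverse (sEv :: pre.reverse) hrev]
    simp only [pvLoopB, hstart', if_true]
    by_cases hpend : ((pvLoopB pvInitSt suf.reverse).status == "pending") = true
    · have hpe := pvLoopB_pending suf.reverse hrev pvInitSt (by simpa using hpend)
      rw [hpe]
      simp [pvOut, pvInitSt, pvErrPart]
    · simp [pvOut, pvErrPart, hpend]

-- ===== VERDICT (by name: the statement is the Claim_ definition above) =====
theorem task_status_from_events_py_spec : Claim_equal_task_status_from_events_py := by
  intro events _ _
  unfold Spec_task_status_from_events_py
  exact pvMain events
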